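-- pv_equiv track=rewrite | github.com/gabrielefalace/Building-AI | count_sequence.py | count
-- ===== SOURCE A (Python) =====
-- def count(seq):
--     occurrences = 0
--     for j in range(0, len(seq)-4):
--         counter = 0
--         if seq[j] == 1:
--             for i in range(j, j+5):
--                 if seq[i] == 1:
--                     counter = counter + 1
--         if counter == 5:
--             occurrences = occurrences + 1
--
--     return occurrences
-- ===== SOURCE B (Python) =====
-- def count(seq):
--     occurrences = 0
--     run = 0
--     for x in seq:
--         if x == 1:
--             run = run + 1
--             if run >= 5:
--                 occurrences = occurrences + 1
--         else:
--             run = 0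
--     return occurrences
-- ===== Notes on version B (the rewrite author's own statement) =====
-- stated objective: simpler
-- what changed: Replaced the nested per-position 5-element window recheck with a single pass maintaining the run length of consecutive 1s, counting a window whenever the run reaches 5.
import Mathlib
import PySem

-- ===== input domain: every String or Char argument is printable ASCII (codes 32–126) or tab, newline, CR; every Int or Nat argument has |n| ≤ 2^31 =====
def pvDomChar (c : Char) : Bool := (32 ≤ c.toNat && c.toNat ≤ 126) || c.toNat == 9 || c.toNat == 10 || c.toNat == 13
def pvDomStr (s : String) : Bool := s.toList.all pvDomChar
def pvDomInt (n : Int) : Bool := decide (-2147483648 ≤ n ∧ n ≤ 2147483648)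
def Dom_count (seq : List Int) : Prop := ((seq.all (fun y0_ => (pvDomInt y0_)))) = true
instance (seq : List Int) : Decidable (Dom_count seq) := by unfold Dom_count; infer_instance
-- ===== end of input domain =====

-- B replaces A's nested per-position 5-element window recheck with a single pass tracking
-- the run length of consecutive 1s (objective: simpler).


-- ===== PORT A =====
-- for j in range(0, len(seq)-4): counter over window j..j+4, occurrences += (counter == 5)
def count (seq : List Int) : Int :=
  (PySem.List.pyRange 0 ((seq.length : Int) - 4) 1).foldl (fun occurrences j =>
    let counter : Int :=
      if PySem.List.pyGetD seq j 0 == 1 then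
        (PySem.List.pyRange j (j + 5) 1).foldl
          (fun counter i => if PySem.List.pyGetD seq i 0 == 1 then counter + 1 else counter) 0
      else 0
    if counter == 5 then occurrences + 1 else occurrences) 0

-- ===== PORT B =====
-- single pass: run of consecutive 1s; count when run reaches 5
def count_alt (seq : List Int) : Int :=
  (seq.foldl (fun (st : Int × Int) x =>
    if x == 1 then
      let run := st.2 + 1
      (if run ≥ 5 then st.1 + 1 else st.1, run)
    else (st.1, 0)) (0, 0)).1

-- ===== PRECONDITION & SPEC =====
def Spec_count (seq : List Int) (out : Int) : Prop := out = count_alt seq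
instance (seq : List Int) (out : Int) : Decidable (Spec_count seq out) := by unfold Spec_count; infer_instance

-- ===== CLAIM (what is proved, stated in full; the proofs are below) =====
def Claim_equal_count : Prop := ∀ (seq : List Int), Dom_count seq → Spec_count seq (count seq)

-- ===== LEMMAS AND PROOFS =====

-- window predicate: the five elements starting at k are all 1
def pvW (seq : List Int) (k : Nat) : Bool :=
  (List.range 5).all (fun i => seq.getD (k + i) 0 == 1)

-- common specification: number of window start positions
def pvF (seq : List Int) : Int :=
  (((List.range (seq.length - 4)).filter (pvW seq)).length : Int)

-- run of leading ones
def pvHeadRun : List Int → Nat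
  | [] => 0
  | x :: xs => if x = 1 then pvHeadRun xs + 1 else 0


theorem headRun_ge_iff (l : List Int) (k : Nat) :
    k ≤ pvHeadRun l ↔ ∀ i < k, l.getD i 0 = 1 := by
  induction l generalizing k with
  | nil =>
    cases k with
    | zero => simp
    | succ k =>
      simp only [pvHeadRun]
      constructor
      · omega
      · intro h; have := h 0 (Nat.succ_pos k); simp at this
  | cons x xs ih =>
    cases k with
    | zero => simp
    | succ k =>
      by_cases hx : x = 1
      · simp only [pvHeadRun, if_pos hx]
        constructor
        · intro h i hi
          cases i with
          | zero => simpa using hx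
          | succ i => simpa using (ih k).mp (by omega) i (by omega)
        · intro h
          have h0 : k ≤ pvHeadRun xs :=
            (ih k).mpr (fun i hi => by simpa using h (i+1) (by omega))
          omega
      · simp only [pvHeadRun, if_neg hx]
        constructor
        · omega
        · intro h
          have := h 0 (by omega)
          simp at this
          exact absurd this hx

theorem headRun_le (l : List Int) : pvHeadRun l ≤ l.length := by
  induction l with
  | nil => simp [pvHeadRun]
  | cons x xs ih =>
    by_cases hx : x = 1
    · simp [pvHeadRun, hx]; omega
    · simp [pvHeadRun, hx]

theorem getD_rev (s : List Int) (j : Nat) (hj : j < s.length) :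
    s.reverse.getD j 0 = s.getD (s.length - 1 - j) 0 := by
  rw [List.getD_eq_getElem _ _ (by simpa using hj), List.getD_eq_getElem _ _ (by omega)]
  simp [List.getElem_reverse]

theorem tail_window_iff (s : List Int) (hn : 4 ≤ s.length) :
    (∀ i < 4, s.getD (s.length - 4 + i) 0 = 1) ↔ 4 ≤ pvHeadRun s.reverse := by
  rw [headRun_ge_iff]
  constructor
  · intro h j hj
    rw [getD_rev s j (by omega)]
    have := h (3 - j) (by omega)
    rwa [show s.length - 4 + (3 - j) = s.length - 1 - j by omega] at this
  · intro h i hi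
    have := h (3 - i) (by omega)
    rw [getD_rev s (3 - i) (by omega)] at this
    rwa [show s.length - 1 - (3 - i) = s.length - 4 + i by omega] at this

theorem pvW_iff (seq : List Int) (k : Nat) :
    pvW seq k = true ↔ ∀ i < 5, seq.getD (k + i) 0 = 1 := by
  simp [pvW, List.all_eq_true, List.mem_range]

theorem pvW_append (s : List Int) (x : Int) (k : Nat) (hk : k + 5 ≤ s.length) :
    pvW (s ++ [x]) k = pvW s k := by
  rw [Bool.eq_iff_iff, pvW_iff, pvW_iff]
  constructor <;> intro h i hi <;> have := h i hi
  · rwa [List.getD_append _ _ _ _ (by omega)] at this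
  · rwa [List.getD_append _ _ _ _ (by omega)]

theorem pvW_last (s : List Int) (x : Int) (hn : 4 ≤ s.length) :
    pvW (s ++ [x]) (s.length - 4) = true ↔ (x = 1 ∧ 4 ≤ pvHeadRun s.reverse) := by
  rw [pvW_iff, ← tail_window_iff s hn]
  constructor
  · intro h
    constructor
    · have h4 := h 4 (by omega)
      rw [show s.length - 4 + 4 = s.length by omega,
        List.getD_append_right _ _ _ _ (by omega), Nat.sub_self] at h4
      simpa using h4
    · intro i hi
      have := h i (by omega)
      rwa [List.getD_append _ _ _ _ (by omega)] at this
  · rintro ⟨hx, h⟩ i hi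
    by_cases h4 : i = 4
    · subst h4
      rw [show s.length - 4 + 4 = s.length by omega,
        List.getD_append_right _ _ _ _ (by omega), Nat.sub_self]
      simpa using hx
    · rw [List.getD_append _ _ _ _ (by omega)]
      exact h i (by omega)

theorem pvF_append (s : List Int) (x : Int) :
    pvF (s ++ [x]) = pvF s + (if x = 1 ∧ 4 ≤ pvHeadRun s.reverse then 1 else 0) := by
  by_cases hn : 4 ≤ s.length
  · have hlen : (s ++ [x]).length - 4 = (s.length - 4) + 1 := by simp; omega
    unfold pvF
    rw [hlen, List.range_succ, List.filter_append,
      List.filter_congr (fun k hk => pvW_append s x k (by have := List.mem_range.mp hk; omega)),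
      List.length_append]
    by_cases hw : x = 1 ∧ 4 ≤ pvHeadRun s.reverse
    · rw [if_pos hw]
      have hW : pvW (s ++ [x]) (s.length - 4) = true := (pvW_last s x hn).mpr hw
      simp [hW]
    · rw [if_neg hw]
      have hW : ¬ pvW (s ++ [x]) (s.length - 4) = true := fun h => hw ((pvW_last s x hn).mp h)
      simp [hW]
  · have hle := headRun_le s.reverse
    rw [List.length_reverse] at hle
    rw [if_neg (by rintro ⟨-, h⟩; omega)]
    unfold pvF
    rw [show (s ++ [x]).length - 4 = 0 by simp; omega, show s.length - 4 = 0 by omega]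
    simp

theorem alt_loop (s : List Int) :
    s.foldl (fun (st : Int × Int) x =>
      if x == 1 then
        let run := st.2 + 1
        (if run ≥ 5 then st.1 + 1 else st.1, run)
      else (st.1, 0)) ((0:Int), (0:Int))
    = (pvF s, (pvHeadRun s.reverse : Int)) := by
  induction s using List.reverseRecOn with
  | nil => simp [pvF, pvHeadRun]
  | append_singleton s x ih =>
    rw [List.foldl_append, ih]
    simp only [List.foldl_cons, List.foldl_nil, List.reverse_append, List.reverse_singleton,
      List.singleton_append, pvF_append]
    by_cases hx : x = 1
    · by_cases hr : 4 ≤ pvHeadRun s.reverse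
      · have h5 : (5:Int) ≤ (pvHeadRun s.reverse : Int) + 1 := by omega
        simp [hx, hr, pvHeadRun, h5]
      · have h5 : ¬ (5:Int) ≤ (pvHeadRun s.reverse : Int) + 1 := by omega
        simp [hx, hr, pvHeadRun, h5]
    · simp [hx, pvHeadRun, show (x == 1) = false by simpa using hx]

theorem count_alt_eq_pvF (seq : List Int) : count_alt seq = pvF seq := by
  unfold count_alt
  rw [alt_loop]

theorem body_eq (seq : List Int) (k : Nat) :
    ((if PySem.List.pyGetD seq (k:Int) 0 == 1 then
        (PySem.List.pyRange (k:Int) ((k:Int)+5) 1).foldl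
          (fun c i => if PySem.List.pyGetD seq i 0 == 1 then c + 1 else c) (0:Int)
      else 0) == 5) = pvW seq k := by
  have hg : ∀ t : Nat, PySem.List.pyGetD seq ((k:Int) + (t:Int)) 0 = seq.getD (k + t) 0 := by
    intro t
    rw [← Nat.cast_add, PySem.List.pyGetD_natCast]
  have hg0 : PySem.List.pyGetD seq (k:Int) 0 = seq.getD k 0 := by
    rw [PySem.List.pyGetD_natCast]
  rw [PySem.List.pyRange_one, show ((k:Int) + 5 - (k:Int)).toNat = 5 by omega,
    List.foldl_map, show List.range 5 = [0,1,2,3,4] by decide]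
  simp only [List.foldl_cons, List.foldl_nil, hg, hg0]
  by_cases h0 : seq.getD (k+0) 0 = 1 <;>
    by_cases h1 : seq.getD (k+1) 0 = 1 <;>
    by_cases h2 : seq.getD (k+2) 0 = 1 <;>
    by_cases h3 : seq.getD (k+3) 0 = 1 <;>
    by_cases h4 : seq.getD (k+4) 0 = 1 <;>
    simp_all [pvW, show List.range 5 = [0,1,2,3,4] by decide]

theorem count_eq_pvF (seq : List Int) : count seq = pvF seq := by
  unfold count
  rw [PySem.List.pyRange_one, show (((seq.length : Int)) - 4 - 0).toNat = seq.length - 4 by omega,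
    List.foldl_map]
  trans (List.foldl (fun (occ : Int) (k : Nat) => if pvW seq k then occ + 1 else occ) 0
    (List.range (seq.length - 4)))
  · exact PySem.List.foldl_congr_mem _ _ _ _ (fun acc k _ => by
      simp only [zero_add, body_eq])
  · rw [PySem.List.foldl_if_add_one]
    simp [pvF, List.countP_eq_length_filter]

-- ===== VERDICT (by name: the statement is the Claim_ definition above) =====
theorem count_spec : Claim_equal_count := by
  intro seq _
  unfold Spec_count
  rw [count_eq_pvF, count_alt_eq_pvF]
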